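-- pv_equiv track=rewrite | github.com/SinR0str0/TeoriaGraficas | Pagina/brain.py | MIncidenciaD
-- ===== SOURCE A (Python) =====
-- def MIncidenciaD(n:int, e:int, s:list, l:list):
--     mat = [["0" for _ in range(e)] for _ in range(n)]
--     for x in range(e):
--         mat[s[x]-1][x] = "+1"
--         if mat[l[x]-1][x] == "+1" or mat[l[x]-1][x]=="-1":
--             mat[l[x]-1][x] = "±1"
--         else:
--             mat[l[x]-1][x] = "-1"
--
--     return mat
-- ===== SOURCE B (Python) =====
-- def MIncidenciaD(n: int, e: int, s: list, l: list):
--     # Build one column per edge, then gather the n rows from the columns.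
--     cols = []
--     for x in range(e):
--         col = ["0"] * n
--         col[s[x] - 1] = "+1"
--         col[l[x] - 1] = "±1" if col[l[x] - 1] == "+1" else "-1"
--         cols.append(col)
--     return [[col[i] for col in cols] for i in range(n)]
-- ===== Notes on version B (the rewrite author's own statement) =====
-- stated objective: alternative
-- what changed: B builds the matrix column-by-column (one fresh column per edge, dropping A's redundant '-1' re-check) and then gathers the n rows from the columns, instead of A's in-place mutation of a prebuilt n x e row matrix.
import Mathlib
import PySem

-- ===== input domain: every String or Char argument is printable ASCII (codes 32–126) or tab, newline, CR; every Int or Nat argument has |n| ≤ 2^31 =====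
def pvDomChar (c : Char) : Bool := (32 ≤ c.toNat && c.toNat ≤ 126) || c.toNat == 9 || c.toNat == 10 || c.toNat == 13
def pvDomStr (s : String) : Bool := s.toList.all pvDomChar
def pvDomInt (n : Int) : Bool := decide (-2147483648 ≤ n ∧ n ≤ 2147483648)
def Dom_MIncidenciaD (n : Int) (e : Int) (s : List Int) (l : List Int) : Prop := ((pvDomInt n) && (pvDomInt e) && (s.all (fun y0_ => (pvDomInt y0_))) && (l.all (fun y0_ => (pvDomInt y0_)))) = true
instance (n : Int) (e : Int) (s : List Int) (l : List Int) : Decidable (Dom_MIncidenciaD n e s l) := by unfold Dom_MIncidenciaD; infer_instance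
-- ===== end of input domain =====

-- B builds one fresh column per edge and then gathers the rows from the columns,
-- instead of A's in-place mutation of a prebuilt row-major matrix (objective: alternative).

-- ===== PORT A =====
-- Python negative-index wraparound: exact for -len ≤ i < len; Pre_ excludes IndexError inputs.
def pvWrap (len : Nat) (i : Int) : Nat := (if i < 0 then i + len else i).toNat

-- mat[i][x] = v
def pvMatSet (mat : List (List String)) (i : Int) (x : Nat) (v : String) : List (List String) :=
  mat.modify (pvWrap mat.length i) (fun row => row.set x v)

-- mat[i][x]
def pvMatGet (mat : List (List String)) (i : Int) (x : Nat) : String :=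
  (mat.getD (pvWrap mat.length i) []).getD x ""

-- the body of A's for-loop, named
def pvStepFn (s l : List Int) (mat : List (List String)) (x : Nat) : List (List String) :=
  let mat1 := pvMatSet mat (s.getD x 0 - 1) x "+1"
  if pvMatGet mat1 (l.getD x 0 - 1) x = "+1" ∨ pvMatGet mat1 (l.getD x 0 - 1) x = "-1" then
    pvMatSet mat1 (l.getD x 0 - 1) x "±1"
  else
    pvMatSet mat1 (l.getD x 0 - 1) x "-1"

def MIncidenciaD (n : Int) (e : Int) (s : List Int) (l : List Int) : List (List String) :=
  (List.range e.toNat).foldl (pvStepFn s l)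
    (List.replicate n.toNat (List.replicate e.toNat "0"))

-- ===== PORT B =====
-- one fresh column per edge
def pvCol_alt (n : Int) (s l : List Int) (x : Nat) : List String :=
  let col0 := List.replicate n.toNat "0"
  let col1 := col0.set (pvWrap col0.length (s.getD x 0 - 1)) "+1"
  col1.set (pvWrap col1.length (l.getD x 0 - 1))
    (if col1.getD (pvWrap col1.length (l.getD x 0 - 1)) "" = "+1" then "±1" else "-1")

def MIncidenciaD_alt (n : Int) (e : Int) (s : List Int) (l : List Int) : List (List String) :=
  let cols := (List.range e.toNat).map (pvCol_alt n s l)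
  (List.range n.toNat).map (fun i => cols.map (fun col => col.getD i ""))

-- ===== PRECONDITION & SPEC =====
-- Pre_ excludes exactly the inputs on which A raises IndexError: an edge index x < e
-- beyond the length of s or l, or a vertex value whose index s[x]-1 / l[x]-1 falls
-- outside Python's valid range [-n, n) for a list of n rows.
def Pre_MIncidenciaD (n : Int) (e : Int) (s : List Int) (l : List Int) : Prop :=
  e ≤ (s.length : Int) ∧ e ≤ (l.length : Int) ∧
  ∀ x ∈ List.range e.toNat,
    (-n ≤ s.getD x 0 - 1 ∧ s.getD x 0 - 1 < n) ∧ (-n ≤ l.getD x 0 - 1 ∧ l.getD x 0 - 1 < n)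
instance (n : Int) (e : Int) (s : List Int) (l : List Int) : Decidable (Pre_MIncidenciaD n e s l) := by unfold Pre_MIncidenciaD; infer_instance
def pvWitness_MIncidenciaD : Int × Int × List Int × List Int := (3, 3, [1, 2, 3], [2, 3, 3])

def Spec_MIncidenciaD (n : Int) (e : Int) (s : List Int) (l : List Int) (out : List (List String)) : Prop := out = MIncidenciaD_alt n e s l
instance (n : Int) (e : Int) (s : List Int) (l : List Int) (out : List (List String)) : Decidable (Spec_MIncidenciaD n e s l out) := by unfold Spec_MIncidenciaD; infer_instance

-- ===== CLAIM (what is proved, stated in full; the proofs are below) =====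
def Claim_equal_MIncidenciaD : Prop := ∀ (n : Int) (e : Int) (s : List Int) (l : List Int), Dom_MIncidenciaD n e s l → Pre_MIncidenciaD n e s l → Spec_MIncidenciaD n e s l (MIncidenciaD n e s l)

-- ===== LEMMAS AND PROOFS =====

-- The common closed form: entry of row i, column x.
def pvEntry (n' : Nat) (s l : List Int) (i x : Nat) : String :=
  if i = pvWrap n' (l.getD x 0 - 1) then
    (if pvWrap n' (s.getD x 0 - 1) = pvWrap n' (l.getD x 0 - 1) then "±1" else "-1")
  else if i = pvWrap n' (s.getD x 0 - 1) then "+1" else "0"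

def pvMk (n' e' : Nat) (f : Nat → Nat → String) : List (List String) :=
  (List.range n').map (fun i => (List.range e').map (f i))

theorem pvWrap_lt {n : Int} {v : Int} (h1 : -n ≤ v) (h2 : v < n) : pvWrap n.toNat v < n.toNat := by
  unfold pvWrap
  split <;> omega

theorem pvMk_length (n' e' : Nat) (f : Nat → Nat → String) : (pvMk n' e' f).length = n' := by
  simp [pvMk]

theorem pvMk_congr (n' e' : Nat) (f g : Nat → Nat → String)
    (h : ∀ i < n', ∀ x < e', f i x = g i x) : pvMk n' e' f = pvMk n' e' g := by
  unfold pvMk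
  apply List.map_congr_left
  intro i hi
  apply List.map_congr_left
  intro x hx
  exact h i (List.mem_range.mp hi) x (List.mem_range.mp hx)

theorem pvMk_const (n' e' : Nat) (v : String) :
    pvMk n' e' (fun _ _ => v) = List.replicate n' (List.replicate e' v) := by
  apply List.ext_getElem
  · simp [pvMk]
  · intro i h1 h2
    simp only [pvMk, List.getElem_map, List.getElem_replicate]
    apply List.ext_getElem
    · simp
    · intro x hx1 hx2
      simp

theorem pvRow_set (e' : Nat) (g : Nat → String) (k : Nat) (v : String) :
    ((List.range e').map g).set k v = (List.range e').map (fun x => if x = k then v else g x) := by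
  apply List.ext_getElem
  · simp
  · intro x h1 h2
    simp only [List.getElem_set, List.getElem_map, List.getElem_range]
    by_cases h : k = x
    · rw [if_pos h, if_pos h.symm]
    · rw [if_neg h, if_neg (fun hh : x = k => h hh.symm)]

theorem pvMk_set (n' e' : Nat) (f : Nat → Nat → String) (j k : Nat) (hj : j < n') (v : String) :
    (pvMk n' e' f).modify j (fun row => row.set k v)
      = pvMk n' e' (fun i x => if i = j ∧ x = k then v else f i x) := by
  apply List.ext_getElem
  · simp [pvMk]
  · intro i h1 h2
    simp only [pvMk, List.length_modify, List.length_map, List.length_range] at h1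
    simp only [pvMk, List.getElem_modify, List.getElem_map, List.getElem_range]
    by_cases hij : j = i
    · rw [if_pos hij, pvRow_set e' (f i) k v]
      apply List.map_congr_left
      intro x hx
      by_cases hxk : x = k
      · rw [if_pos hxk, if_pos ⟨hij.symm, hxk⟩]
      · rw [if_neg hxk, if_neg (fun h : i = j ∧ x = k => hxk h.2)]
    · rw [if_neg hij]
      apply List.map_congr_left
      intro x hx
      rw [if_neg (fun h : i = j ∧ x = k => hij h.1.symm)]

theorem pvMk_get (n' e' : Nat) (f : Nat → Nat → String) (j k : Nat) (hj : j < n') (hk : k < e') :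
    ((pvMk n' e' f).getD j []).getD k "" = f j k := by
  have h1 : (pvMk n' e' f).getD j [] = (List.range e').map (f j) := by
    rw [List.getD_eq_getElem?_getD]
    simp [pvMk, List.getElem?_map, List.getElem?_range hj]
  rw [h1, List.getD_eq_getElem?_getD]
  simp [List.getElem?_map, List.getElem?_range hk]

-- the effect of processing edge k on an all-"0" column k
theorem pvStep (n e : Int) (s l : List Int) (f : Nat → Nat → String) (k : Nat)
    (hk : k < e.toNat)
    (hs1 : -n ≤ s.getD k 0 - 1) (hs2 : s.getD k 0 - 1 < n)
    (hl1 : -n ≤ l.getD k 0 - 1) (hl2 : l.getD k 0 - 1 < n)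
    (h0 : ∀ i, f i k = "0") :
    pvStepFn s l (pvMk n.toNat e.toNat f) k
      = pvMk n.toNat e.toNat (fun i x => if x = k then pvEntry n.toNat s l i k else f i x) := by
  have hsi := pvWrap_lt hs1 hs2
  have hli := pvWrap_lt hl1 hl2
  set si := pvWrap n.toNat (s.getD k 0 - 1) with hsidef
  set li := pvWrap n.toNat (l.getD k 0 - 1) with hlidef
  show (if pvMatGet (pvMatSet (pvMk n.toNat e.toNat f) (s.getD k 0 - 1) k "+1") (l.getD k 0 - 1) k = "+1"
        ∨ pvMatGet (pvMatSet (pvMk n.toNat e.toNat f) (s.getD k 0 - 1) k "+1") (l.getD k 0 - 1) k = "-1" then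
      pvMatSet (pvMatSet (pvMk n.toNat e.toNat f) (s.getD k 0 - 1) k "+1") (l.getD k 0 - 1) k "±1"
    else
      pvMatSet (pvMatSet (pvMk n.toNat e.toNat f) (s.getD k 0 - 1) k "+1") (l.getD k 0 - 1) k "-1")
      = pvMk n.toNat e.toNat (fun i x => if x = k then pvEntry n.toNat s l i k else f i x)
  have hmat1 : pvMatSet (pvMk n.toNat e.toNat f) (s.getD k 0 - 1) k "+1"
      = pvMk n.toNat e.toNat (fun i x => if i = si ∧ x = k then "+1" else f i x) := by
    unfold pvMatSet
    rw [pvMk_length, ← hsidef]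
    exact pvMk_set _ _ _ _ _ hsi _
  rw [hmat1]
  have hget : pvMatGet (pvMk n.toNat e.toNat (fun i x => if i = si ∧ x = k then "+1" else f i x)) (l.getD k 0 - 1) k
      = if li = si ∧ k = k then "+1" else f li k := by
    unfold pvMatGet
    rw [pvMk_length, ← hlidef]
    exact pvMk_get _ _ _ _ _ hli hk
  rw [hget]
  have hset2 : ∀ v, pvMatSet (pvMk n.toNat e.toNat (fun i x => if i = si ∧ x = k then "+1" else f i x)) (l.getD k 0 - 1) k v
      = pvMk n.toNat e.toNat (fun i x => if i = li ∧ x = k then v else if i = si ∧ x = k then "+1" else f i x) := by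
    intro v
    unfold pvMatSet
    rw [pvMk_length, ← hlidef]
    exact pvMk_set _ _ _ _ _ hli _
  have hEntry : ∀ i, pvEntry n.toNat s l i k
      = if i = li then (if si = li then "±1" else "-1") else if i = si then "+1" else "0" := by
    intro i
    unfold pvEntry
    rw [← hsidef, ← hlidef]
  by_cases hls : li = si
  · have hv : (if li = si ∧ k = k then "+1" else f li k) = "+1" := if_pos ⟨hls, rfl⟩
    rw [hv, if_pos (Or.inl rfl), hset2]
    apply pvMk_congr
    intro i hi x hx
    show (if i = li ∧ x = k then "±1" else if i = si ∧ x = k then "+1" else f i x)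
        = (if x = k then pvEntry n.toNat s l i k else f i x)
    by_cases hxk : x = k
    · rw [if_pos hxk, hEntry]
      by_cases hil : i = li
      · rw [if_pos ⟨hil, hxk⟩, if_pos hil, if_pos hls.symm]
      · have his : ¬ i = si := fun h => hil (h.trans hls.symm)
        rw [if_neg (fun h : i = li ∧ x = k => hil h.1),
          if_neg (fun h : i = si ∧ x = k => his h.1), if_neg hil, if_neg his]
        subst hxk
        exact h0 i
    · rw [if_neg (fun h : i = li ∧ x = k => hxk h.2),
        if_neg (fun h : i = si ∧ x = k => hxk h.2), if_neg hxk]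
  · have hv : (if li = si ∧ k = k then "+1" else f li k) = "0" := by
      rw [if_neg (fun h : li = si ∧ k = k => hls h.1)]
      exact h0 li
    rw [hv]
    have hne : ¬ ((("0":String) = "+1") ∨ (("0":String) = "-1")) := by decide
    rw [if_neg hne, hset2]
    apply pvMk_congr
    intro i hi x hx
    show (if i = li ∧ x = k then "-1" else if i = si ∧ x = k then "+1" else f i x)
        = (if x = k then pvEntry n.toNat s l i k else f i x)
    by_cases hxk : x = k
    · rw [if_pos hxk, hEntry]
      by_cases hil : i = li
      · rw [if_pos ⟨hil, hxk⟩, if_pos hil, if_neg (fun h : si = li => hls h.symm)]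
      · rw [if_neg (fun h : i = li ∧ x = k => hil h.1), if_neg hil]
        by_cases his : i = si
        · rw [if_pos ⟨his, hxk⟩, if_pos his]
        · rw [if_neg (fun h : i = si ∧ x = k => his h.1), if_neg his]
          subst hxk
          exact h0 i
    · rw [if_neg (fun h : i = li ∧ x = k => hxk h.2),
        if_neg (fun h : i = si ∧ x = k => hxk h.2), if_neg hxk]

theorem pvA_fold (n e : Int) (s l : List Int)
    (hPre : ∀ x ∈ List.range e.toNat,
      (-n ≤ s.getD x 0 - 1 ∧ s.getD x 0 - 1 < n) ∧ (-n ≤ l.getD x 0 - 1 ∧ l.getD x 0 - 1 < n))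
    (k : Nat) (hke : k ≤ e.toNat) :
    (List.range k).foldl (pvStepFn s l) (List.replicate n.toNat (List.replicate e.toNat "0"))
      = pvMk n.toNat e.toNat (fun i x => if x < k then pvEntry n.toNat s l i x else "0") := by
  induction k with
  | zero =>
    simp only [List.range_zero, List.foldl_nil]
    rw [← pvMk_const n.toNat e.toNat "0"]
    apply pvMk_congr
    intro i hi x hx
    show ("0":String) = (if x < 0 then pvEntry n.toNat s l i x else "0")
    rw [if_neg (Nat.not_lt_zero x)]
  | succ m ih =>
    have hme : m ≤ e.toNat := Nat.le_of_succ_le hke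
    have hmlt : m < e.toNat := hke
    rw [List.range_succ, List.foldl_append, ih hme, List.foldl_cons, List.foldl_nil]
    obtain ⟨⟨hs1, hs2⟩, ⟨hl1, hl2⟩⟩ := hPre m (List.mem_range.mpr hmlt)
    rw [pvStep n e s l (fun i x => if x < m then pvEntry n.toNat s l i x else "0") m hmlt hs1 hs2 hl1 hl2
      (fun i => if_neg (Nat.lt_irrefl m))]
    apply pvMk_congr
    intro i hi x hx
    show (if x = m then pvEntry n.toNat s l i m else if x < m then pvEntry n.toNat s l i x else "0")
        = (if x < m + 1 then pvEntry n.toNat s l i x else "0")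
    by_cases hxm : x = m
    · subst hxm
      rw [if_pos rfl, if_pos (Nat.lt_succ_self x)]
    · rw [if_neg hxm]
      by_cases hlt : x < m
      · rw [if_pos hlt, if_pos (Nat.lt_succ_of_lt hlt)]
      · rw [if_neg hlt, if_neg (fun h : x < m + 1 => hxm (Nat.eq_of_lt_succ_of_not_lt h hlt))]

theorem pvColEntry (n e : Int) (s l : List Int) (x : Nat) (i : Nat) (hi : i < n.toNat)
    (hs1 : -n ≤ s.getD x 0 - 1) (hs2 : s.getD x 0 - 1 < n)
    (hl1 : -n ≤ l.getD x 0 - 1) (hl2 : l.getD x 0 - 1 < n) :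
    (pvCol_alt n s l x).getD i "" = pvEntry n.toNat s l i x := by
  have hsi := pvWrap_lt hs1 hs2
  have hli := pvWrap_lt hl1 hl2
  show ((((List.replicate n.toNat "0").set (pvWrap (List.replicate n.toNat ("0":String)).length (s.getD x 0 - 1)) "+1").set
      (pvWrap ((List.replicate n.toNat ("0":String)).set (pvWrap (List.replicate n.toNat ("0":String)).length (s.getD x 0 - 1)) "+1").length (l.getD x 0 - 1))
      (if ((List.replicate n.toNat ("0":String)).set (pvWrap (List.replicate n.toNat ("0":String)).length (s.getD x 0 - 1)) "+1").getD
          (pvWrap ((List.replicate n.toNat ("0":String)).set (pvWrap (List.replicate n.toNat ("0":String)).length (s.getD x 0 - 1)) "+1").length (l.getD x 0 - 1)) "" = "+1"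
        then "±1" else "-1")).getD i "")
      = pvEntry n.toNat s l i x
  simp only [List.length_set, List.length_replicate]
  set si := pvWrap n.toNat (s.getD x 0 - 1) with hsidef
  set li := pvWrap n.toNat (l.getD x 0 - 1) with hlidef
  have hcolget : ∀ (j : Nat), j < n.toNat →
      (((List.replicate n.toNat ("0":String)).set si "+1").getD j "") = if j = si then "+1" else "0" := by
    intro j hj
    rw [List.getD_eq_getElem?_getD, List.getElem?_set, List.length_replicate]
    by_cases h : si = j
    · rw [if_pos h, if_pos hsi, Option.getD_some, if_pos h.symm]
    · rw [if_neg h, List.getElem?_replicate, if_pos hj, Option.getD_some,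
        if_neg (fun hh : j = si => h hh.symm)]
  have hEntry : pvEntry n.toNat s l i x
      = if i = li then (if si = li then "±1" else "-1") else if i = si then "+1" else "0" := by
    unfold pvEntry
    rw [← hsidef, ← hlidef]
  rw [hcolget li hli, hEntry, List.getD_eq_getElem?_getD, List.getElem?_set, List.length_set,
    List.length_replicate]
  by_cases hil : li = i
  · rw [if_pos hil, if_pos hli, Option.getD_some, if_pos hil.symm]
    by_cases hls : li = si
    · rw [if_pos hls, if_pos rfl, if_pos hls.symm]
    · have h0ne : ¬ (("0":String) = "+1") := by decide
      rw [if_neg hls, if_neg h0ne, if_neg (fun h : si = li => hls h.symm)]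
  · rw [if_neg hil, ← List.getD_eq_getElem?_getD, hcolget i hi,
      if_neg (fun h : i = li => hil h.symm)]

-- ===== VERDICT (by name: the statement is the Claim_ definition above) =====
theorem MIncidenciaD_spec : Claim_equal_MIncidenciaD := by
  intro n e s l hDom hPre
  unfold Spec_MIncidenciaD
  obtain ⟨hs, hl, hIdx⟩ := hPre
  show MIncidenciaD n e s l = MIncidenciaD_alt n e s l
  unfold MIncidenciaD
  rw [pvA_fold n e s l hIdx e.toNat (le_refl _)]
  show pvMk n.toNat e.toNat (fun i x => if x < e.toNat then pvEntry n.toNat s l i x else "0")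
      = (List.range n.toNat).map (fun i => ((List.range e.toNat).map (pvCol_alt n s l)).map (fun col => col.getD i ""))
  unfold pvMk
  apply List.map_congr_left
  intro i hi
  have h1 : List.map (fun x => if x < e.toNat then pvEntry n.toNat s l i x else "0") (List.range e.toNat)
      = List.map (fun x => pvEntry n.toNat s l i x) (List.range e.toNat) :=
    List.map_congr_left (fun x hx => if_pos (List.mem_range.mp hx))
  have h2 : List.map ((fun col => col.getD i "") ∘ pvCol_alt n s l) (List.range e.toNat)
      = List.map (fun x => pvEntry n.toNat s l i x) (List.range e.toNat) :=
    List.map_congr_left (fun x hx => by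
      obtain ⟨⟨hs1, hs2⟩, ⟨hl1, hl2⟩⟩ := hIdx x hx
      exact pvColEntry n e s l x i (List.mem_range.mp hi) hs1 hs2 hl1 hl2)
  have h3 : ((List.range e.toNat).map (pvCol_alt n s l)).map (fun col => col.getD i "")
      = List.map ((fun col => col.getD i "") ∘ pvCol_alt n s l) (List.range e.toNat) :=
    List.map_map
  exact h1.trans (h2.symm.trans h3.symm)
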